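-- pv_equiv track=rewrite | github.com/LubosKolouch/perlweeklychallenge-club | challenge-318/lubos-kolouch/python/ch-2.py | can_reverse_to_match
-- ===== SOURCE A (Python) =====
-- def can_reverse_to_match(source: list[int], target: list[int]) -> bool:
--     """
--     Determine if one array can be made equal to another by reversing exactly one contiguous subarray.
--
--     Args:
--         source (List[int]): The source array of integers.
--         target (List[int]): The target array of integers.
--
--     Returns:
--         bool: True if the source array can be made equal to the target array by reversing one subarray, False otherwise.
--     """
--     # Return False if arrays are not the same length
--     if len(source) != len(target):
--         return False
--
--     # Return True if arrays are already equal
--     if source == target: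
--         return True
--
--     # Find the first and last indices where the arrays differ
--     start, end = None, None
--     for i in range(len(source)):
--         if source[i] != target[i]:
--             if start is None:
--                 start = i
--             end = i
--
--     # If no differing indices were found, return False
--     if start is None or end is None:
--         return False
--
--     # Reverse the subarray in the source array
--     reversed_source = source[:start]
--     reversed_source += source[start:end + 1][::-1] + source[end + 1:]
--
--     # Check if reversing the subarray makes the arrays equal
--     return reversed_source == target
-- ===== SOURCE B (Python) =====
-- def _strip(s, t):
--     # drop the common prefix of two equal-length lists
--     k = 0
--     while k < len(s) and s[k] == t[k]:
--         k += 1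
--     return s[k:], t[k:]
--
--
-- def can_reverse_to_match(source: list[int], target: list[int]) -> bool:
--     if len(source) != len(target):
--         return False
--     s, t = _strip(source, target)
--     rs, rt = _strip(s[::-1], t[::-1])
--     return rs == rt[::-1]
-- ===== Notes on version B (the rewrite author's own statement) =====
-- stated objective: simpler
-- what changed: Replaces A's boundary-tracking scan plus reconstruction of a reversed copy of source by a decomposition: strip the common prefix of the lists, strip the common suffix (= common prefix of the reversed lists), and compare the remaining window with its reversal; no rebuilt full list.
import Mathlib
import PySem

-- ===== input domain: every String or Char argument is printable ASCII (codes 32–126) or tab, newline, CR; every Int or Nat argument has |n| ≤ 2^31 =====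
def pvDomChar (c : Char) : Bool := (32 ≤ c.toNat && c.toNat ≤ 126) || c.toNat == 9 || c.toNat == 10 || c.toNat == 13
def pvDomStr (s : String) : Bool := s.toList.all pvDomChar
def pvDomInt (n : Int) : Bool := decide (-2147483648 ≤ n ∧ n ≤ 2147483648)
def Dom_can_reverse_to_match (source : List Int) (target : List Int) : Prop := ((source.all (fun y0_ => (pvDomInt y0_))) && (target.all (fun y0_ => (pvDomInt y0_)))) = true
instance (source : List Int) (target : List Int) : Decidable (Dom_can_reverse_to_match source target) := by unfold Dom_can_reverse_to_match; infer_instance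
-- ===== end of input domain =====

-- B strips the common prefix of the lists and of their reverses and compares the window with its
-- reversal, instead of A's index scan plus rebuilding a reversed copy (objective: simpler).

-- ===== PORT A =====
-- the loop body: if source[i] != target[i]: (start = i if start is None), end = i
def pvStepA (source target : List Int) (st : Option Int × Option Int) (i : Int) :
    Option Int × Option Int :=
  if PySem.List.pyGetD source i 0 ≠ PySem.List.pyGetD target i 0 then
    (if st.1 = none then some i else st.1, some i)
  else st

def can_reverse_to_match (source : List Int) (target : List Int) : Bool :=
  if source.length ≠ target.length then false
  else if source = target then true
  else
    let st := (PySem.List.pyRange 0 (source.length : Int) 1).foldl (pvStepA source target)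
      (none, none)
    match st.1, st.2 with
    | some s, some e =>
        -- reversed_source = source[:s]; reversed_source += source[s:e+1][::-1] + source[e+1:]
        -- ( [::-1] via PySem.List.slice?, which is `some (·.reverse)` here )
        let reversed_source :=
          PySem.List.slice source none (some s) ++
          ((PySem.List.slice? (PySem.List.slice source (some s) (some (e + 1))) none none
              (-1)).getD [] ++
            PySem.List.slice source (some (e + 1)) none)
        decide (reversed_source = target)
    | _, _ => false

-- ===== PORT B =====
-- _strip's while-loop counter k: how many leading positions agree
def pvCpl : List Int → List Int → Nat
  | a :: s, b :: t => if a = b then pvCpl s t + 1 else 0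
  | _, _ => 0

-- _strip: drop the common prefix of two (equal-length) lists
def pvStrip (s t : List Int) : List Int × List Int :=
  (s.drop (pvCpl s t), t.drop (pvCpl s t))

-- Source B's s[::-1] is ported as List.reverse
def can_reverse_to_match_alt (source : List Int) (target : List Int) : Bool :=
  if source.length ≠ target.length then false
  else
    let (s, t) := pvStrip source target
    let (rs, rt) := pvStrip s.reverse t.reverse
    decide (rs = rt.reverse)

-- ===== PRECONDITION & SPEC =====
def Spec_can_reverse_to_match (source : List Int) (target : List Int) (out : Bool) : Prop := out = can_reverse_to_match_alt source target
instance (source : List Int) (target : List Int) (out : Bool) : Decidable (Spec_can_reverse_to_match source target out) := by unfold Spec_can_reverse_to_match; infer_instance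

-- ===== CLAIM (what is proved, stated in full; the proofs are below) =====
def Claim_equal_can_reverse_to_match : Prop := ∀ (source : List Int) (target : List Int), Dom_can_reverse_to_match source target → Spec_can_reverse_to_match source target (can_reverse_to_match source target)

-- ===== LEMMAS AND PROOFS =====

theorem pvStrip_eq (s t : List Int) :
    pvStrip s t = (s.drop (pvCpl s t), t.drop (pvCpl s t)) := rfl

theorem pvCpl_take_eq (s t : List Int) :
    s.take (pvCpl s t) = t.take (pvCpl s t) := by
  induction s generalizing t with
  | nil => cases t <;> simp [pvCpl]
  | cons a s ih =>
      cases t with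
      | nil => simp [pvCpl]
      | cons b t =>
          by_cases h : a = b <;> simp [pvCpl, h, ih]

theorem pvCpl_self (s : List Int) : pvCpl s s = s.length := by
  induction s with
  | nil => simp [pvCpl]
  | cons a s ih => simp [pvCpl, ih]

theorem pvCpl_lt (s t : List Int) (hlen : s.length = t.length) (hne : s ≠ t) :
    pvCpl s t < s.length := by
  induction s generalizing t with
  | nil =>
      cases t with
      | nil => exact absurd rfl hne
      | cons b t => simp at hlen
  | cons a s ih =>
      cases t with
      | nil => simp at hlen
      | cons b t =>
          by_cases h : a = b
          · subst h
            have : s ≠ t := by intro h'; exact hne (by rw [h'])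
            have := ih t (by simpa using hlen) this
            simp [pvCpl]
            omega
          · simp [pvCpl, h]

theorem pvCpl_getD_ne (s t : List Int) (hs : pvCpl s t < s.length)
    (ht : pvCpl s t < t.length) :
    s.getD (pvCpl s t) 0 ≠ t.getD (pvCpl s t) 0 := by
  induction s generalizing t with
  | nil => simp at hs
  | cons a s ih =>
      cases t with
      | nil => simp at ht
      | cons b t =>
          by_cases h : a = b
          · simp only [pvCpl, if_pos h] at hs ht ⊢
            simpa using ih t (by simpa using hs) (by simpa using ht)
          · simpa [pvCpl, h] using h

theorem pvCpl_take_take (s t : List Int) (m : Nat) (h : pvCpl s t < m) :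
    pvCpl (s.take m) (t.take m) = pvCpl s t := by
  induction s generalizing t m with
  | nil => cases t <;> simp [pvCpl]
  | cons a s ih =>
      cases t with
      | nil => simp [pvCpl]
      | cons b t =>
          cases m with
          | zero => simp [pvCpl] at h
          | succ m =>
              by_cases hab : a = b
              · simp only [pvCpl, if_pos hab] at h ⊢
                simp [List.take_succ_cons, pvCpl, hab, ih t m (by omega)]
              · simp [pvCpl, hab]

-- the diff-index list
def pvDL (s t : List Int) (n : Nat) : List Nat :=
  (List.range n).filter (fun i => decide (s.getD i 0 ≠ t.getD i 0))

theorem pvIfOr (o : Option Int) (i : Int) :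
    (if o = none then some i else o) = o.or (some i) := by
  cases o <;> rfl

theorem pvMapOr (o o' : Option Nat) (f : Nat → Int) :
    (o.or o').map f = (o.map f).or (o'.map f) := by
  cases o <;> rfl

theorem pvLoop_eq (s t : List Int) (n : Nat) :
    (PySem.List.pyRange 0 (n : Int) 1).foldl (pvStepA s t) (none, none) =
      (Option.map (Nat.cast : Nat → Int) (pvDL s t n).head?,
       Option.map (Nat.cast : Nat → Int) (pvDL s t n).getLast?) := by
  rw [PySem.List.pyRange_zero_natCast, List.foldl_map]
  induction n with
  | zero => rfl
  | succ n ih =>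
      rw [List.range_succ, List.foldl_append, ih]
      simp only [List.foldl_cons, List.foldl_nil]
      by_cases h : s.getD n 0 ≠ t.getD n 0
      · have h' : ¬s[n]?.getD 0 = t[n]?.getD 0 := by
          simpa [List.getD_eq_getElem?_getD] using h
        have hDL : pvDL s t (n + 1) = pvDL s t n ++ [n] := by
          simp [pvDL, List.range_succ, List.filter_append, h']
        rw [hDL]
        simp only [pvStepA, PySem.List.pyGetD_natCast]
        rw [if_pos h, List.head?_append, List.getLast?_append, List.getLast?_singleton,
          List.head?_cons, Option.some_or, pvMapOr, pvIfOr]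
        rfl
      · have h' : s[n]?.getD 0 = t[n]?.getD 0 := by
          have := not_not.mp h
          simpa [List.getD_eq_getElem?_getD] using this
        have hDL : pvDL s t (n + 1) = pvDL s t n := by
          simp [pvDL, List.range_succ, List.filter_append, h']
        rw [hDL]
        simp only [pvStepA, PySem.List.pyGetD_natCast]
        rw [if_neg h]

theorem pvHead_filter_range (P : Nat → Bool) (n p : Nat) (hpn : p < n) (hP : P p = true)
    (hmin : ∀ i, i < p → ¬ P i = true) :
    ((List.range n).filter P).head? = some p := by
  induction n with
  | zero => omega
  | succ n ih =>
      rw [List.range_succ, List.filter_append, List.head?_append]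
      by_cases h : p = n
      · subst h
        have : (List.range p).filter P = [] :=
          List.filter_eq_nil_iff.mpr (by intro a ha; exact hmin a (List.mem_range.mp ha))
        simp [this, hP]
      · rw [ih (by omega)]
        rfl

theorem pvLast_filter_range (P : Nat → Bool) (n r : Nat) (hrn : r < n) (hP : P r = true)
    (hmax : ∀ i, r < i → i < n → ¬ P i = true) :
    ((List.range n).filter P).getLast? = some r := by
  induction n with
  | zero => omega
  | succ n ih =>
      rw [List.range_succ, List.filter_append, List.getLast?_append]
      by_cases h : r = n
      · subst h; simp [hP]
      · have : ¬ P n = true := hmax n (by omega) (by omega)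
        simp only [List.filter_cons, this, if_neg, List.filter_nil]
        rw [ih (by omega) (fun i h1 h2 => hmax i h1 (by omega))]
        simp

theorem pvAlt_eq (source target : List Int) (hlen : source.length = target.length) :
    can_reverse_to_match_alt source target =
      decide ((pvStrip (pvStrip source target).1.reverse (pvStrip source target).2.reverse).1 =
        (pvStrip (pvStrip source target).1.reverse (pvStrip source target).2.reverse).2.reverse) := by
  rw [can_reverse_to_match_alt, if_neg (by omega)]

theorem pvMain (source target : List Int) :
    can_reverse_to_match source target = can_reverse_to_match_alt source target := by
  by_cases hlen : source.length = target.length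
  · by_cases heq : source = target
    · subst heq
      rw [can_reverse_to_match, if_neg (by omega), if_pos rfl,
        pvAlt_eq source source rfl, pvStrip_eq source source, pvCpl_self, List.drop_length]
      simp [pvStrip, pvCpl]
    · -- main case: lengths equal, lists differ
      have hrevne : source.reverse ≠ target.reverse := fun h => heq (List.reverse_injective h)
      obtain ⟨n, hn⟩ : ∃ n, source.length = n := ⟨_, rfl⟩
      obtain ⟨p, hpdef⟩ : ∃ p, pvCpl source target = p := ⟨_, rfl⟩
      obtain ⟨q, hqdef⟩ : ∃ q, pvCpl source.reverse target.reverse = q := ⟨_, rfl⟩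
      have hlen' : target.length = n := by omega
      have hp : p < n := by
        have := pvCpl_lt source target hlen heq
        omega
      have hq : q < n := by
        have := pvCpl_lt source.reverse target.reverse (by simp [hlen]) hrevne
        rw [hqdef, List.length_reverse, hn] at this
        exact this
      have E1 : source.take p = target.take p := by
        rw [← hpdef]; exact pvCpl_take_eq source target
      have E2 : source.reverse.take q = target.reverse.take q := by
        rw [← hqdef]; exact pvCpl_take_eq source.reverse target.reverse
      have E2' : source.drop (n - q) = target.drop (n - q) := by
        have h2 := congrArg List.reverse E2
        rwa [List.reverse_take, List.reverse_take, List.reverse_reverse, List.reverse_reverse,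
          List.length_reverse, List.length_reverse, hn, hlen'] at h2
      -- elementwise consequences (at the getElem? level)
      have hpref : ∀ i, i < p → source[i]? = target[i]? := by
        intro i hip
        have h1 := congrArg (fun l => l[i]?) E1
        simpa [List.getElem?_take, hip] using h1
      have hsuf : ∀ i, n - q ≤ i → source[i]? = target[i]? := by
        intro i hi
        have h1 := congrArg (fun l => l[i - (n - q)]?) E2'
        simp only [List.getElem?_drop] at h1
        have he : (n - q) + (i - (n - q)) = i := by omega
        rwa [he] at h1
      have hpq : p + q < n := by
        by_contra hcon
        push_neg at hcon
        apply heq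
        apply List.ext_getElem?
        intro i
        by_cases hip : i < p
        · exact hpref i hip
        · exact hsuf i (by omega)
      -- first and last differing positions, in getElem? normal form
      have hPp : ¬ source[p]?.getD 0 = target[p]?.getD 0 := by
        have := pvCpl_getD_ne source target (by omega) (by omega)
        rw [hpdef] at this
        simpa [List.getD_eq_getElem?_getD] using this
      have hPr : ¬ source[n - 1 - q]?.getD 0 = target[n - 1 - q]?.getD 0 := by
        have h1 := pvCpl_getD_ne source.reverse target.reverse
          (by rw [hqdef, List.length_reverse, hn]; omega)
          (by rw [hqdef, List.length_reverse, hlen']; omega)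
        rw [hqdef] at h1
        have h2 : source.reverse[q]? = source[n - 1 - q]? := by
          rw [List.getElem?_reverse (by rw [hn]; omega), hn]
        have h3 : target.reverse[q]? = target[n - 1 - q]? := by
          rw [List.getElem?_reverse (by rw [hlen']; omega), hlen']
        simpa [List.getD_eq_getElem?_getD, h2, h3] using h1
      have hmin : ∀ i, i < p → source[i]?.getD 0 = target[i]?.getD 0 := by
        intro i hip
        rw [hpref i hip]
      have hmax : ∀ i, n - 1 - q < i → i < n → source[i]?.getD 0 = target[i]?.getD 0 := by
        intro i h1 h2
        rw [hsuf i (by omega)]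
      -- A's loop result
      have hHead : (pvDL source target n).head? = some p := by
        apply pvHead_filter_range _ _ _ hp
        · simpa using hPp
        · intro i hip
          simpa using hmin i hip
      have hLast : (pvDL source target n).getLast? = some (n - 1 - q) := by
        apply pvLast_filter_range _ _ _ (by omega)
        · simpa using hPr
        · intro i h1 h2
          simpa using hmax i h1 h2
      -- evaluate A
      have hc1 : ((n - 1 - q : Nat) : Int) + 1 = ((n - q : Nat) : Int) := by omega
      have hA : can_reverse_to_match source target =
          decide (source.take p ++
            (((source.drop p).take (n - q - p)).reverse ++ source.drop (n - q)) = target) := by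
        rw [can_reverse_to_match, if_neg (by omega), if_neg heq, hn]
        rw [pvLoop_eq, hHead, hLast]
        simp only [Option.map_some, hc1, PySem.List.slice_to_natCast,
          PySem.List.slice_natCast, PySem.List.slice_from_natCast,
          PySem.List.slice?_none_none_neg_one, Option.getD_some]
      -- evaluate B
      have hq2 : pvCpl (source.drop p).reverse (target.drop p).reverse = q := by
        rw [List.reverse_drop, List.reverse_drop, hn, hlen',
          pvCpl_take_take source.reverse target.reverse (n - p) (by rw [hqdef]; omega)]
        exact hqdef
      have hrs : (source.drop p).reverse.drop q =
          ((source.drop p).take (n - p - q)).reverse := by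
        rw [List.reverse_take]
        congr 1
        rw [List.length_drop, hn]
        omega
      have hrt : (target.drop p).reverse.drop q =
          ((target.drop p).take (n - p - q)).reverse := by
        rw [List.reverse_take]
        congr 1
        rw [List.length_drop, hlen']
        omega
      have hB : can_reverse_to_match_alt source target =
          decide (((source.drop p).take (n - p - q)).reverse =
            (target.drop p).take (n - p - q)) := by
        rw [pvAlt_eq source target hlen]
        simp only [pvStrip_eq, hpdef, hq2, hrs, hrt, List.reverse_reverse]
      -- the decomposition of target
      have hT : target = target.take p ++
          ((target.drop p).take (n - p - q) ++ target.drop (n - q)) := by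
        have h1 : (target.drop p).drop (n - p - q) = target.drop (n - q) := by
          rw [List.drop_drop]
          congr 1
          omega
        rw [← h1, List.take_append_drop, List.take_append_drop]
      rw [hA, hB]
      apply decide_eq_decide.mpr
      have hw : n - q - p = n - p - q := by omega
      rw [hw]
      constructor
      · intro h
        rw [E1, E2'] at h
        conv at h => rhs; rw [hT]
        exact List.append_cancel_right (List.append_cancel_left h)
      · intro h
        rw [E1, E2', h]
        exact hT.symm
  · -- lengths differ: both return false
    rw [can_reverse_to_match, can_reverse_to_match_alt, if_pos (by omega), if_pos (by omega)]

-- ===== VERDICT (by name: the statement is the Claim_ definition above) =====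
theorem can_reverse_to_match_spec : Claim_equal_can_reverse_to_match := by
  intro source target _
  unfold Spec_can_reverse_to_match
  exact pvMain source target
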